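-- pv_equiv track=rewrite | github.com/mit-73/cmc | parsers/dart_parser.py | _check_override_before
-- ===== SOURCE A (Python) =====
-- def _check_override_before(text: str, pos: int) -> bool:
--     start = max(0, pos - 300)
--     chunk = text[start:pos]
--     lines = chunk.rstrip().split('\n')
--     for line in reversed(lines):
--         stripped = line.strip()
--         if stripped.startswith('@override'):
--             return True
--         if stripped.startswith('@'):
--             continue
--         if stripped.startswith('///') or stripped.startswith('//'):
--             continue
--         if stripped == '':
--             continue
--         break
--     return False
-- ===== SOURCE B (Python) =====
-- def _check_override_before(text: str, pos: int) -> bool: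
--     start = max(0, pos - 300)
--     lines = text[start:pos].rstrip().split('\n')
--     # stage 1: index just past the last "real" code line (non-annotation, non-comment, non-blank)
--     cut = 0
--     for i, line in enumerate(lines):
--         s = line.strip()
--         if not (s.startswith('@') or s.startswith('//') or s == ''):
--             cut = i + 1
--     # stage 2: the trailing skippable run is lines[cut:]; look for @override in it
--     return any(l.strip().startswith('@override') for l in lines[cut:])
-- ===== Notes on version B (the rewrite author's own statement) =====
-- stated objective: alternative
-- what changed: Replaced A's backward scan with early return/continue/break by a staged two-pass computation: one forward enumerate pass finds the index just past the last real code line, then any() over the trailing slice checks for '@override'.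
import Mathlib
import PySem

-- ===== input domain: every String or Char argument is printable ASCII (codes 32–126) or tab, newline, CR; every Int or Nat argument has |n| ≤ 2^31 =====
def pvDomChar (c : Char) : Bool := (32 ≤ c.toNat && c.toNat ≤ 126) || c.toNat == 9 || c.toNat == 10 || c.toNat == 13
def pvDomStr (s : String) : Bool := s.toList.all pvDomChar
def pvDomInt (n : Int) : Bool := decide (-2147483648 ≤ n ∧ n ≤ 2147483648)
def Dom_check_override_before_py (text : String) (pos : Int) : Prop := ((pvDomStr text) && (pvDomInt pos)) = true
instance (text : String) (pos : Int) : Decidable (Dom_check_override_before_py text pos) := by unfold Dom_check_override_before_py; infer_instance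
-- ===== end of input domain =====

-- B replaces A's backward scan (early return/continue/break) by two staged forward passes:
-- find the index past the last real code line, then any('@override') over the trailing slice
-- (objective: alternative decomposition, same cost).

-- ===== PORT A =====
-- A's backward loop with early return / continue / break, as structural recursion over the reversed line list.
def pvLoopA : List (List Char) → Bool
  | [] => false
  | line :: rest =>
    let stripped := PySem.Chars.strip line
    if PySem.Chars.startswith stripped "@override".toList then true
    else if PySem.Chars.startswith stripped "@".toList then pvLoopA rest
    else if PySem.Chars.startswith stripped "///".toList || PySem.Chars.startswith stripped "//".toList then pvLoopA rest
    else if stripped == [] then pvLoopA rest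
    else false

def check_override_before_py (text : String) (pos : Int) : Bool :=
  let start := max 0 (pos - 300)
  let chunk := PySem.Chars.slice text.toList (some start) (some pos)
  let lines := PySem.Chars.splitOn (PySem.Chars.rstrip chunk) ['\n']
  pvLoopA lines.reverse

-- ===== PORT B =====
-- `not (s.startswith('@') or s.startswith('//') or s == '')` applied to the stripped line
def pvIsCode (l : List Char) : Bool :=
  let s := PySem.Chars.strip l
  !(PySem.Chars.startswith s "@".toList || PySem.Chars.startswith s "//".toList || s == [])

-- `l.strip().startswith('@override')`
def pvIsOverride (l : List Char) : Bool :=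
  PySem.Chars.startswith (PySem.Chars.strip l) "@override".toList

def check_override_before_py_alt (text : String) (pos : Int) : Bool :=
  let start := max 0 (pos - 300)
  let lines := PySem.Chars.splitOn (PySem.Chars.rstrip (PySem.Chars.slice text.toList (some start) (some pos))) ['\n']
  let cut : Int := (PySem.List.enumerate lines 0).foldl (fun c p => if pvIsCode p.2 then p.1 + 1 else c) 0
  (PySem.List.slice lines (some cut) none).any pvIsOverride

-- ===== PRECONDITION & SPEC =====
def Spec_check_override_before_py (text : String) (pos : Int) (out : Bool) : Prop := out = check_override_before_py_alt text pos
instance (text : String) (pos : Int) (out : Bool) : Decidable (Spec_check_override_before_py text pos out) := by unfold Spec_check_override_before_py; infer_instance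

-- ===== CLAIM (what is proved, stated in full; the proofs are below) =====
def Claim_equal_check_override_before_py : Prop := ∀ (text : String) (pos : Int), Dom_check_override_before_py text pos → Spec_check_override_before_py text pos (check_override_before_py text pos)

-- ===== LEMMAS AND PROOFS =====
-- B's cut, as a function of the line list
def pvCut (ls : List (List Char)) : Int :=
  (PySem.List.enumerate ls 0).foldl (fun c p => if pvIsCode p.2 then p.1 + 1 else c) 0

lemma pv_sw_trans (s p q : List Char) (hpq : q.IsPrefix p)
    (h : PySem.Chars.startswith s p = true) : PySem.Chars.startswith s q = true := by
  rw [PySem.Chars.startswith_iff] at h ⊢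
  exact hpq.trans h

lemma pvCut_append (ls : List (List Char)) (x : List Char) :
    pvCut (ls ++ [x]) = if pvIsCode x then (ls.length : Int) + 1 else pvCut ls := by
  unfold pvCut
  rw [PySem.List.enumerate_append, List.foldl_append]
  simp [PySem.List.enumerate_cons, PySem.List.enumerate_nil]

lemma pvCut_bounds (ls : List (List Char)) : 0 ≤ pvCut ls ∧ pvCut ls ≤ ls.length := by
  induction ls using List.reverseRecOn with
  | nil => simp [pvCut, PySem.List.enumerate_nil]
  | append_singleton ls x ih =>
    rw [pvCut_append]
    simp only [List.length_append, List.length_cons, List.length_nil]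
    split_ifs <;> omega

-- the core equivalence: A's backward cascade equals B's cut-then-any on any line list
lemma pvLoop_eq_cut (ls : List (List Char)) :
    pvLoopA ls.reverse = (ls.drop (pvCut ls).toNat).any pvIsOverride := by
  induction ls using List.reverseRecOn with
  | nil => simp [pvCut, PySem.List.enumerate_nil, pvLoopA]
  | append_singleton ls x ih =>
    rw [List.reverse_append]
    simp only [List.reverse_singleton, List.singleton_append]
    rw [pvLoopA, pvCut_append]
    by_cases hc : pvIsCode x
    · -- a real code line: cut points past everything, and A's loop breaks with False
      rw [if_pos hc]
      have hdrop : ((ls ++ [x]).drop ((ls.length : Int) + 1).toNat) = [] := by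
        apply List.drop_eq_nil_of_le
        simp
      rw [hdrop]
      unfold pvIsCode at hc
      simp only [Bool.not_eq_true', Bool.or_eq_false_iff] at hc
      obtain ⟨⟨h1, h2⟩, h3⟩ := hc
      have hov : PySem.Chars.startswith (PySem.Chars.strip x) "@override".toList = false := by
        cases h : PySem.Chars.startswith (PySem.Chars.strip x) "@override".toList
        · rfl
        · have h' := pv_sw_trans (PySem.Chars.strip x) "@override".toList "@".toList (by decide) h
          rw [h1] at h'
          exact (Bool.false_ne_true h').elim
      have h3' : PySem.Chars.startswith (PySem.Chars.strip x) "///".toList = false := by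
        cases h : PySem.Chars.startswith (PySem.Chars.strip x) "///".toList
        · rfl
        · have h' := pv_sw_trans (PySem.Chars.strip x) "///".toList "//".toList (by decide) h
          rw [h2] at h'
          exact (Bool.false_ne_true h').elim
      rw [if_neg (by simp only [hov]; exact Bool.false_ne_true),
          if_neg (by simp only [h1]; exact Bool.false_ne_true),
          if_neg (by simp only [h3', h2, Bool.or_self]; exact Bool.false_ne_true),
          if_neg (by simp only [h3]; exact Bool.false_ne_true)]
      rfl
    · -- a skippable line: cut unchanged, the tail grows by x
      rw [if_neg hc]
      have hb := pvCut_bounds ls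
      have hle : (pvCut ls).toNat ≤ ls.length := by omega
      rw [List.drop_append_of_le_length hle, List.any_append]
      have hx : [x].any pvIsOverride
          = PySem.Chars.startswith (PySem.Chars.strip x) "@override".toList := by
        simp only [List.any_cons, List.any_nil, Bool.or_false]
        rfl
      rw [hx]
      rw [Bool.not_eq_true] at hc
      simp only [pvIsCode, Bool.not_eq_false'] at hc
      rcases Bool.eq_false_or_eq_true (PySem.Chars.startswith (PySem.Chars.strip x) "@override".toList) with hov | hov
      · rw [if_pos hov, hov, Bool.or_true]
      · rw [hov, if_neg Bool.false_ne_true, Bool.or_false]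
        split_ifs with hA hB hC
        · exact ih
        · exact ih
        · exact ih
        · exfalso
          simp only [Bool.or_eq_true_iff] at hc
          rcases hc with (h | h) | h
          · exact hA h
          · exact hB (by rw [h]; exact Bool.or_true _)
          · exact hC h

-- ===== VERDICT (by name: the statement is the Claim_ definition above) =====
theorem check_override_before_py_spec : Claim_equal_check_override_before_py := by
  intro text pos _
  unfold Spec_check_override_before_py check_override_before_py check_override_before_py_alt
  dsimp only
  have h : ∀ ls : List (List Char),
      pvLoopA ls.reverse = (PySem.List.slice ls (some (pvCut ls)) none).any pvIsOverride := by
    intro ls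
    rw [PySem.List.slice_from _ (pvCut_bounds ls).1, pvLoop_eq_cut]
  exact h _
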